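-- pv_equiv track=rewrite | github.com/stalj/pp1 | 13-Test3/p2.py | f
-- ===== SOURCE A (Python) =====
-- def f(arr):
--   if not all(len(i) == len(arr) for i in arr):
--     return False
--   for i in range(len(arr)):
--     for j in range(len(arr[i])):
--       if arr[i][j] != (i+1) * (j+1):
--         return False
--   return True
-- ===== SOURCE B (Python) =====
-- def f(arr):
--   n = len(arr)
--   if any(len(row) != n for row in arr):
--     return False
--   if n == 0:
--     return True
--   first = list(range(1, n + 1))
--   if arr[0] != first:
--     return False
--   for prev, cur in zip(arr, arr[1:]):
--     for p, c, s in zip(prev, cur, first):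
--       if c != p + s:
--         return False
--   return True
-- ===== Notes on version B (the rewrite author's own statement) =====
-- stated objective: alternative
-- what changed: B checks the multiplication-table property via its recurrence structure: first row must equal [1..n] and each subsequent row, zipped with its predecessor, must equal it plus the first row elementwise, replacing A's closed-form (i+1)*(j+1) comparison over index loops with multiplication-free adjacent-row difference checks.
import Mathlib
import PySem

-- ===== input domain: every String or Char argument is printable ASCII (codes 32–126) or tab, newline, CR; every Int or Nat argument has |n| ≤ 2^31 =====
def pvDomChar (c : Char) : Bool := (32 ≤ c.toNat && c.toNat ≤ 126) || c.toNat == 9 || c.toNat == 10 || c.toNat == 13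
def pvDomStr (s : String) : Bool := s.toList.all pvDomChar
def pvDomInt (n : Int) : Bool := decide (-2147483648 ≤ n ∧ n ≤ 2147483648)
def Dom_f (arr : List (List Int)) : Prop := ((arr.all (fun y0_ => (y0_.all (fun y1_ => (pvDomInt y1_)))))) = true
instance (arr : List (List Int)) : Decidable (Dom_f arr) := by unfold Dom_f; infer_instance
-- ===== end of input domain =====

-- B verifies the table by its recurrence (first row = [1..n], each row = previous row + first row,
-- via adjacent-row zips) instead of A's closed-form (i+1)*(j+1) index loops (alternative).

-- ===== PORT A =====
-- A: guard `all(len(i) == len(arr) for i in arr)`, then nested index loops with early return False.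
def f (arr : List (List Int)) : Bool :=
  if !(arr.all (fun i => i.length == arr.length)) then false
  else
    (List.range arr.length).all (fun i =>
      (List.range (arr.getD i []).length).all (fun j =>
        !((arr.getD i []).getD j 0 != (Int.ofNat i + 1) * (Int.ofNat j + 1))))

-- ===== PORT B =====
-- B: squareness guard, first row must be range(1,n+1), then zip(arr, arr[1:]) with
-- zip(prev, cur, first) checking cur = prev + first elementwise.
def f_alt (arr : List (List Int)) : Bool :=
  let n := arr.length
  if arr.any (fun row => row.length != n) then false
  else if n == 0 then true
  else
    let first := (List.range' 1 n).map Int.ofNat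
    if arr.headD [] != first then false
    else
      (arr.zip arr.tail).all (fun pc =>
        (pc.1.zip (pc.2.zip first)).all (fun x => x.2.1 == x.1 + x.2.2))

-- ===== PRECONDITION & SPEC =====
def Spec_f (arr : List (List Int)) (out : Bool) : Prop := out = f_alt arr
instance (arr : List (List Int)) (out : Bool) : Decidable (Spec_f arr out) := by unfold Spec_f; infer_instance

-- ===== CLAIM (what is proved, stated in full; the proofs are below) =====
def Claim_equal_f : Prop := ∀ (arr : List (List Int)), Dom_f arr → Spec_f arr (f arr)

-- ===== LEMMAS AND PROOFS =====

-- The common characterisation: square, with entry (i,j) equal to (i+1)*(j+1).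
def Tbl (arr : List (List Int)) : Prop :=
  (∀ row ∈ arr, row.length = arr.length) ∧
  ∀ i (hi : i < arr.length) j (hj : j < arr[i].length),
    arr[i][j] = (Int.ofNat i + 1) * (Int.ofNat j + 1)

theorem f_iff (arr : List (List Int)) : f arr = true ↔ Tbl arr := by
  unfold f Tbl
  constructor
  · intro h
    by_cases hc : (arr.all (fun i => i.length == arr.length)) = true
    · rw [if_neg (by simp [hc])] at h
      simp only [List.all_eq_true, List.mem_range] at h
      refine ⟨fun row hr => by simpa using (List.all_eq_true.mp hc) row hr, ?_⟩
      intro i hi j hj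
      have hget : arr.getD i [] = arr[i] := List.getD_eq_getElem arr [] hi
      have h1 := h i hi j (by rw [hget]; exact hj)
      rw [hget, List.getD_eq_getElem arr[i] 0 hj] at h1
      simpa using h1
    · have hce := Bool.eq_false_iff.mpr (fun he => hc he)
      rw [if_pos (by simp [hce])] at h
      exact absurd h (by simp)
  · rintro ⟨hsq, hval⟩
    have hall : arr.all (fun i => i.length == arr.length) = true :=
      List.all_eq_true.mpr fun r hr => by simpa using hsq r hr
    rw [if_neg (by simp [hall])]
    simp only [List.all_eq_true, List.mem_range]
    intro i hi j hj
    rw [List.getD_eq_getElem arr [] hi] at hj ⊢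
    rw [List.getD_eq_getElem arr[i] 0 hj]
    simp [hval i hi j hj]

theorem first_get (n j : Nat) (hj : j < n) :
    ((List.range' 1 n).map Int.ofNat)[j]'(by simp [hj]) = Int.ofNat (1 + j) := by
  simp [List.getElem_range']

theorem f_alt_iff (arr : List (List Int)) : f_alt arr = true ↔ Tbl arr := by
  by_cases hsq : ∀ row ∈ arr, row.length = arr.length
  case neg =>
    push Not at hsq
    obtain ⟨r, hr, hne⟩ := hsq
    have hany : arr.any (fun row => row.length != arr.length) = true :=
      List.any_eq_true.mpr ⟨r, hr, by simpa using hne⟩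
    have hfa : f_alt arr = false := by
      unfold f_alt; rw [if_pos (by simp [hany])]
    rw [hfa]
    simp only [Bool.false_eq_true, false_iff]
    intro ht
    exact hne (ht.1 r hr)
  case pos =>
    have hany : arr.any (fun row => row.length != arr.length) = false := by
      rw [List.any_eq_false]
      intro r hr
      simpa using hsq r hr
    by_cases hn : arr.length = 0
    · have : arr = [] := List.length_eq_zero_iff.mp hn
      subst this
      constructor
      · intro _; exact ⟨by simp, by simp⟩
      · intro _; rfl
    · -- nonempty square case
      have hpos : 0 < arr.length := Nat.pos_of_ne_zero hn
      have h0 : arr.headD [] = arr[0] := by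
        cases arr with
        | nil => simp at hpos
        | cons a l => rfl
      by_cases hh : arr.headD [] = (List.range' 1 arr.length).map Int.ofNat
      · have hfa : f_alt arr =
            (arr.zip arr.tail).all (fun pc =>
              (pc.1.zip (pc.2.zip ((List.range' 1 arr.length).map Int.ofNat))).all
                (fun x => x.2.1 == x.1 + x.2.2)) := by
          unfold f_alt
          rw [if_neg (by simp [hany]), if_neg (by simpa using hn), if_neg (by simp only [bne_iff_ne, ne_eq, not_not]; exact hh)]
        rw [hfa]
        have hrowlen : ∀ i (hi : i < arr.length), arr[i].length = arr.length :=
          fun i hi => hsq _ (arr.getElem_mem hi)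
        constructor
        · intro hz
          -- extract the pointwise recurrence from the zip-all
          have hz' : ∀ k (hk : k + 1 < arr.length) j (hj : j < arr.length),
              arr[k+1][j]'(by rw [hrowlen _ hk]; exact hj) =
                arr[k][j]'(by rw [hrowlen _ (by omega)]; exact hj) + Int.ofNat (1 + j) := by
            intro k hk j hj
            have hklen : k < (arr.zip arr.tail).length := by
              simp [List.length_zip, List.length_tail]; omega
            have hmem := List.getElem_mem hklen
            have h1 := List.all_eq_true.mp hz _ hmem
            rw [List.getElem_zip] at h1
            simp only at h1
            have htl : arr.tail[k]'(by simp [List.length_tail]; omega) = arr[k+1] := by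
              simp [List.getElem_tail]
            rw [htl] at h1
            have hjlen : j < (arr[k].zip ((arr[k+1]).zip ((List.range' 1 arr.length).map Int.ofNat))).length := by
              simp [List.length_zip, hrowlen _ hk, hrowlen k (by omega)]; omega
            have h2 := List.all_eq_true.mp h1 _ (List.getElem_mem hjlen)
            rw [List.getElem_zip, List.getElem_zip] at h2
            simp only [beq_iff_eq] at h2
            rw [first_get arr.length j hj] at h2
            exact h2
          refine ⟨hsq, ?_⟩
          have key : ∀ i (hi : i < arr.length) j (hj : j < arr.length),
              arr[i][j]'(by rw [hrowlen _ hi]; exact hj) =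
                (Int.ofNat i + 1) * (Int.ofNat j + 1) := by
            intro i
            induction i with
            | zero =>
              intro hi j hj
              have : arr[0] = (List.range' 1 arr.length).map Int.ofNat := by rw [← h0, hh]
              have hg : arr[0][j]'(by rw [hrowlen _ hi]; exact hj) = Int.ofNat (1 + j) := by
                rw [List.getElem_of_eq this]; exact first_get arr.length j hj
              rw [hg]; simp only [Int.ofNat_eq_natCast]; push_cast; ring
            | succ k ih =>
              intro hi j hj
              rw [hz' k hi j hj, ih (by omega) j hj]
              simp only [Int.ofNat_eq_natCast]; push_cast; ring
          intro i hi j hj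
          exact key i hi j (by rw [← hrowlen i hi]; exact hj)
        · rintro ⟨-, hval⟩
          rw [List.all_eq_true]
          intro pc hpc
          obtain ⟨k, hk, hpceq⟩ := List.mem_iff_getElem.mp hpc
          have hklen : k + 1 < arr.length := by
            simp [List.length_zip, List.length_tail] at hk; omega
          rw [List.getElem_zip] at hpceq
          have htl : arr.tail[k]'(by simp [List.length_tail]; omega) = arr[k+1] := by
            simp [List.getElem_tail]
          rw [htl] at hpceq
          subst hpceq
          rw [List.all_eq_true]
          intro x hx
          obtain ⟨j, hj, hxeq⟩ := List.mem_iff_getElem.mp hx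
          have hjn : j < arr.length := by
            simp [List.length_zip, hrowlen _ hklen, hrowlen k (by omega)] at hj; omega
          rw [List.getElem_zip, List.getElem_zip] at hxeq
          subst hxeq
          simp only [beq_iff_eq]
          rw [first_get arr.length j hjn]
          have h1 := hval (k+1) hklen j (by rw [hrowlen _ hklen]; exact hjn)
          have h2 := hval k (by omega) j (by rw [hrowlen k (by omega)]; exact hjn)
          rw [h1, h2]
          simp only [Int.ofNat_eq_natCast]; push_cast; ring
      · have hfa : f_alt arr = false := by
          unfold f_alt
          rw [if_neg (by simp [hany]), if_neg (by simpa using hn), if_pos (by simp only [bne_iff_ne, ne_eq]; exact hh)]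
        rw [hfa]
        simp only [Bool.false_eq_true, false_iff]
        rintro ⟨-, hval⟩
        apply hh
        rw [h0]
        apply List.ext_getElem
        · rw [hsq _ (arr.getElem_mem hpos)]; simp
        · intro j hj hj'
          have hjn : j < arr.length := by rw [← hsq _ (arr.getElem_mem hpos)]; exact hj
          rw [first_get arr.length j hjn, hval 0 hpos j hj]
          simp only [Int.ofNat_eq_natCast]; push_cast; ring

theorem f_eq_alt (arr : List (List Int)) : f arr = f_alt arr := by
  rw [Bool.eq_iff_iff, f_iff, f_alt_iff]

-- ===== VERDICT (by name: the statement is the Claim_ definition above) =====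
theorem f_spec : Claim_equal_f := by
  intro arr _
  unfold Spec_f
  exact f_eq_alt arr
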